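-- pv_equiv track=rewrite | github.com/kyh/vibedgames | plugins/game-art/skills/pixel-snapper/scripts/pixel_snapper.py | sanitize_cuts
-- ===== SOURCE A (Python) =====
-- def sanitize_cuts(cuts: list[int], limit: int) -> list[int]:
--     seen = sorted(set(c for c in cuts if 0 <= c <= limit))
--     if not seen or seen[0] != 0:
--         seen = [0] + seen
--     if seen[-1] != limit:
--         seen.append(limit)
--     deduped: list[int] = []
--     for c in seen:
--         if not deduped or c > deduped[-1]:
--             deduped.append(c)
--     return deduped
-- ===== SOURCE B (Python) =====
-- def _split(l):
--     a, b = [], []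
--     for i, x in enumerate(l):
--         (a if i % 2 == 0 else b).append(x)
--     return a, b
--
--
-- def _merge(xs, ys):
--     # merge two strictly increasing lists, dropping duplicates on ties
--     out = []
--     i = j = 0
--     while i < len(xs) and j < len(ys):
--         if xs[i] < ys[j]:
--             out.append(xs[i]); i += 1
--         elif ys[j] < xs[i]:
--             out.append(ys[j]); j += 1
--         else:
--             out.append(xs[i]); i += 1; j += 1
--     return out + xs[i:] + ys[j:]
--
--
-- def _msort_unique(l):
--     # merge sort that removes duplicates while merging
--     if len(l) <= 1:
--         return list(l)
--     a, b = _split(l)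
--     return _merge(_msort_unique(a), _msort_unique(b))
--
--
-- def sanitize_cuts(cuts: list[int], limit: int) -> list[int]:
--     interior = _msort_unique([c for c in cuts if 0 < c < limit])
--     ends = [0, limit] if limit > 0 else [0]
--     return _merge(ends, interior)
-- ===== Notes on version B (the rewrite author's own statement) =====
-- stated objective: alternative
-- what changed: B never calls sort, builds no set and has no dedup scan: it merge-sorts the strictly interior cuts with a hand-rolled merge sort whose merge step drops duplicates, then merges the result with the endpoint skeleton ([0,limit] or [0]); A sorts a set, patches the endpoints and re-scans to dedup.
import Mathlib
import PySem

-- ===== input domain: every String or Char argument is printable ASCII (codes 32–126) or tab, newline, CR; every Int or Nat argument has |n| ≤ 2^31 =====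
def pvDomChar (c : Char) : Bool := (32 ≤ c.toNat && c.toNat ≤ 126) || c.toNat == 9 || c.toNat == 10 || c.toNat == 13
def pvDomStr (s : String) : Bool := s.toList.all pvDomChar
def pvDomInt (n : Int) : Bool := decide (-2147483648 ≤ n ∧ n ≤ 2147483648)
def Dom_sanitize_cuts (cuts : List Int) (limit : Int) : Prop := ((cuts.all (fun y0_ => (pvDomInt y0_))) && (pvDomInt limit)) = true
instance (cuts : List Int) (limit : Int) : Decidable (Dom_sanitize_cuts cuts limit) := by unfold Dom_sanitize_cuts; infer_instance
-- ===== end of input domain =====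

-- B replaces A's sort-a-set/patch-endpoints/dedup-scan pipeline by a hand-rolled merge
-- sort whose merge step drops duplicates, applied to the strictly interior cuts, followed
-- by one merge with the endpoint skeleton (objective: alternative).

-- ===== PORT A =====
-- A's dedup loop body: 'if not deduped or c > deduped[-1]: deduped.append(c)';
-- deduped[-1] on a nonempty list is getLast?, none is the 'not deduped' branch.
def pvStep (deduped : List Int) (c : Int) : List Int :=
  match deduped.getLast? with
  | none => deduped ++ [c]
  | some last => if last < c then deduped ++ [c] else deduped

def sanitize_cuts (cuts : List Int) (limit : Int) : List Int :=
  let seen0 := PySem.List.sorted (PySem.Set.ofList (cuts.filter (fun c => decide (0 ≤ c) && decide (c ≤ limit)))) (fun x => x) false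
  let seen1 := if seen0 = [] ∨ seen0.head? ≠ some 0 then 0 :: seen0 else seen0
  let seen2 := if seen1.getLast? ≠ some limit then seen1 ++ [limit] else seen1
  seen2.foldl pvStep []

-- ===== PORT B =====
-- _split: deal the elements alternately into two lists
def pvSplit : List Int → List Int × List Int
  | [] => ([], [])
  | x :: xs => let p := pvSplit xs; (x :: p.2, p.1)

theorem pvSplit_len : ∀ (l : List Int), (pvSplit l).1.length = (l.length + 1) / 2 ∧ (pvSplit l).2.length = l.length / 2 := by
  intro l
  induction l with
  | nil => simp [pvSplit]
  | cons x xs ih => simp only [pvSplit, List.length_cons]; omega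

-- _merge: the two-pointer merge loop as structural recursion on the two lists
def pvMerge : List Int → List Int → List Int
  | [], ys => ys
  | x :: xs, [] => x :: xs
  | x :: xs, y :: ys =>
    if x < y then x :: pvMerge xs (y :: ys)
    else if y < x then y :: pvMerge (x :: xs) ys
    else x :: pvMerge xs ys

-- _msort_unique
def pvMsort (l : List Int) : List Int :=
  if l.length ≤ 1 then l
  else pvMerge (pvMsort (pvSplit l).1) (pvMsort (pvSplit l).2)
termination_by l.length
decreasing_by
  · have := pvSplit_len l; omega
  · have := pvSplit_len l; omega

def sanitize_cuts_alt (cuts : List Int) (limit : Int) : List Int :=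
  let interior := pvMsort (cuts.filter (fun c => decide (0 < c) && decide (c < limit)))
  let ends := if 0 < limit then ([0, limit] : List Int) else [0]
  pvMerge ends interior

-- ===== PRECONDITION & SPEC =====
def Spec_sanitize_cuts (cuts : List Int) (limit : Int) (out : List Int) : Prop := out = sanitize_cuts_alt cuts limit
instance (cuts : List Int) (limit : Int) (out : List Int) : Decidable (Spec_sanitize_cuts cuts limit out) := by unfold Spec_sanitize_cuts; infer_instance

-- ===== CLAIM (what is proved, stated in full; the proofs are below) =====
def Claim_equal_sanitize_cuts : Prop := ∀ (cuts : List Int) (limit : Int), Dom_sanitize_cuts cuts limit → Spec_sanitize_cuts cuts limit (sanitize_cuts cuts limit)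

-- ===== LEMMAS AND PROOFS =====

-- A side: recursive form of the dedup loop, with `a` the last kept element
def pvDed (a : Int) : List Int → List Int
  | [] => []
  | c :: l => if a < c then c :: pvDed c l else pvDed a l

theorem pvFoldl_step (l : List Int) : ∀ (acc : List Int) (a : Int),
    l.foldl pvStep (acc ++ [a]) = (acc ++ [a]) ++ pvDed a l := by
  induction l with
  | nil => intro acc a; simp [pvDed]
  | cons c l ih =>
    intro acc a
    by_cases h : a < c
    · have : pvStep (acc ++ [a]) c = (acc ++ [a]) ++ [c] := by
        simp [pvStep, h]
      simp only [List.foldl_cons, this, pvDed, if_pos h]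
      rw [show (acc ++ [a]) ++ [c] = (acc ++ [a]) ++ [c] from rfl, ih (acc ++ [a]) c]
      simp
    · have : pvStep (acc ++ [a]) c = acc ++ [a] := by
        simp [pvStep, h]
      simp only [List.foldl_cons, this, pvDed, if_neg h]
      exact ih acc a

theorem pvFoldl_top (h : Int) (t : List Int) :
    (h :: t).foldl pvStep [] = h :: pvDed h t := by
  have : pvStep [] h = [h] := by simp [pvStep]
  simpa using (List.foldl_cons ▸ (by
    simpa [this] using pvFoldl_step t [] h : (h :: t).foldl pvStep [] = ([] ++ [h]) ++ pvDed h t))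

theorem pvDed_subset : ∀ (l : List Int) (a x : Int), x ∈ pvDed a l → x ∈ l := by
  intro l
  induction l with
  | nil => intro a x hx; simp [pvDed] at hx
  | cons c l ih =>
    intro a x hx
    by_cases h : a < c
    · simp only [pvDed, if_pos h] at hx
      rcases List.mem_cons.mp hx with hx | hx
      · simp [hx]
      · exact List.mem_cons_of_mem _ (ih c x hx)
    · simp only [pvDed, if_neg h] at hx
      exact List.mem_cons_of_mem _ (ih a x hx)

theorem pvDed_mem : ∀ (l : List Int) (a : Int), l.Pairwise (· ≤ ·) → (∀ x ∈ l, a ≤ x) →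
    ∀ x, x ∈ a :: pvDed a l ↔ x ∈ a :: l := by
  intro l
  induction l with
  | nil => intro a _ _ x; simp [pvDed]
  | cons c l ih =>
    intro a hp hle x
    have hac : a ≤ c := hle c (by simp)
    have hp' : l.Pairwise (· ≤ ·) := (List.pairwise_cons.mp hp).2
    have hcl : ∀ y ∈ l, c ≤ y := (List.pairwise_cons.mp hp).1
    by_cases h : a < c
    · simp only [pvDed, if_pos h]
      have := ih c hp' hcl x
      simp only [List.mem_cons] at this ⊢
      tauto
    · have hac' : a = c := le_antisymm hac (not_lt.mp h)
      simp only [pvDed, if_neg h]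
      have := ih a hp' (fun y hy => hac' ▸ hcl y hy) x
      simp only [List.mem_cons] at this ⊢
      subst hac'
      tauto

theorem pvDed_pairwise : ∀ (l : List Int) (a : Int), l.Pairwise (· ≤ ·) → (∀ x ∈ l, a ≤ x) →
    (a :: pvDed a l).Pairwise (· < ·) := by
  intro l
  induction l with
  | nil => intro a _ _; simp [pvDed]
  | cons c l ih =>
    intro a hp hle
    have hp' : l.Pairwise (· ≤ ·) := (List.pairwise_cons.mp hp).2
    have hcl : ∀ y ∈ l, c ≤ y := (List.pairwise_cons.mp hp).1
    by_cases h : a < c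
    · simp only [pvDed, if_pos h]
      refine List.pairwise_cons.mpr ⟨?_, ih c hp' hcl⟩
      intro y hy
      rcases List.mem_cons.mp hy with hy | hy
      · exact hy ▸ h
      · exact lt_of_lt_of_le h (hcl y (pvDed_subset l c y hy))
    · simp only [pvDed, if_neg h]
      exact ih a hp' (fun y hy => le_trans (hle c (by simp)) (hcl y hy))

-- the dedup loop on a sorted (nondecreasing) nonempty list returns sorted(set(l))
theorem pvDedup_sorted (l : List Int) (hp : l.Pairwise (· ≤ ·)) (hne : l ≠ []) :
    l.foldl pvStep [] = PySem.List.sorted (PySem.Set.ofList l) (fun x => x) false := by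
  obtain ⟨h, t, rfl⟩ := List.exists_cons_of_ne_nil hne
  have hp' : t.Pairwise (· ≤ ·) := (List.pairwise_cons.mp hp).2
  have hle : ∀ x ∈ t, h ≤ x := (List.pairwise_cons.mp hp).1
  have hpw : (h :: pvDed h t).Pairwise (· < ·) := pvDed_pairwise t h hp' hle
  have hmem : ∀ x, x ∈ h :: pvDed h t ↔ x ∈ h :: t := pvDed_mem t h hp' hle
  have hnd1 : (h :: pvDed h t).Nodup := hpw.imp (fun hlt => ne_of_lt hlt)
  have hperm : (h :: pvDed h t).Perm (PySem.Set.ofList (h :: t)) := by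
    rw [List.perm_ext_iff_of_nodup hnd1 (PySem.Set.nodup_ofList _)]
    intro x
    rw [hmem x, PySem.Set.mem_ofList]
  rw [pvFoldl_top]
  exact (PySem.List.sorted_eq_of_perm_of_pairwise_lt _ _ (fun x => x) hperm hpw).symm

-- B side: merge and merge-sort lemmas
theorem pvMerge_mem : ∀ (xs ys : List Int) (z : Int), z ∈ pvMerge xs ys ↔ z ∈ xs ∨ z ∈ ys := by
  intro xs ys z
  fun_induction pvMerge xs ys with
  | case1 ys => simp
  | case2 x xs => simp
  | case3 x xs y ys h ih => simp only [List.mem_cons, ih]; tauto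
  | case4 x xs y ys h h' ih => simp only [List.mem_cons, ih]; tauto
  | case5 x xs y ys h h' ih =>
    have hxy : x = y := by omega
    simp only [List.mem_cons, ih]
    subst hxy
    tauto

theorem pvMerge_pairwise : ∀ (xs ys : List Int), xs.Pairwise (· < ·) → ys.Pairwise (· < ·) →
    (pvMerge xs ys).Pairwise (· < ·) := by
  intro xs ys
  fun_induction pvMerge xs ys with
  | case1 ys => intro _ hy; simpa using hy
  | case2 x xs => intro hx _; simpa using hx
  | case3 x xs y ys h ih =>
    intro hx hy
    have hx' : xs.Pairwise (· < ·) := (List.pairwise_cons.mp hx).2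
    have hxl : ∀ z ∈ xs, x < z := (List.pairwise_cons.mp hx).1
    refine List.pairwise_cons.mpr ⟨?_, ih hx' hy⟩
    intro z hz
    rcases (pvMerge_mem xs (y :: ys) z).mp hz with hz | hz
    · exact hxl z hz
    · rcases List.mem_cons.mp hz with rfl | hz
      · exact h
      · exact lt_trans h ((List.pairwise_cons.mp hy).1 z hz)
  | case4 x xs y ys h h' ih =>
    intro hx hy
    have hy' : ys.Pairwise (· < ·) := (List.pairwise_cons.mp hy).2
    have hyl : ∀ z ∈ ys, y < z := (List.pairwise_cons.mp hy).1
    refine List.pairwise_cons.mpr ⟨?_, ih hx hy'⟩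
    intro z hz
    rcases (pvMerge_mem (x :: xs) ys z).mp hz with hz | hz
    · rcases List.mem_cons.mp hz with rfl | hz
      · exact h'
      · exact lt_trans h' ((List.pairwise_cons.mp hx).1 z hz)
    · exact hyl z hz
  | case5 x xs y ys h h' ih =>
    intro hx hy
    have hxy : x = y := by omega
    subst hxy
    have hx' : xs.Pairwise (· < ·) := (List.pairwise_cons.mp hx).2
    refine List.pairwise_cons.mpr ⟨?_, ih hx' (List.pairwise_cons.mp hy).2⟩
    intro z hz
    rcases (pvMerge_mem xs ys z).mp hz with hz | hz
    · exact (List.pairwise_cons.mp hx).1 z hz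
    · exact (List.pairwise_cons.mp hy).1 z hz

theorem pvSplit_mem : ∀ (l : List Int) (z : Int), (z ∈ (pvSplit l).1 ∨ z ∈ (pvSplit l).2) ↔ z ∈ l := by
  intro l
  induction l with
  | nil => intro z; simp [pvSplit]
  | cons x xs ih =>
    intro z
    simp only [pvSplit, List.mem_cons]
    rw [← ih z]
    tauto

theorem pvMsort_mem : ∀ (l : List Int) (z : Int), z ∈ pvMsort l ↔ z ∈ l := by
  intro l
  fun_induction pvMsort l with
  | case1 l h => intro z; rfl
  | case2 l h ih1 ih2 =>
    intro z
    rw [pvMerge_mem, ih1 z, ih2 z, pvSplit_mem]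

theorem pvMsort_pairwise : ∀ (l : List Int), (pvMsort l).Pairwise (· < ·) := by
  intro l
  fun_induction pvMsort l with
  | case1 l h =>
    match l, h with
    | [], _ => simp
    | [x], _ => simp
  | case2 l h ih1 ih2 => exact pvMerge_pairwise _ _ ih1 ih2

theorem sanitize_cuts_main (cuts : List Int) (limit : Int) :
    sanitize_cuts cuts limit = sanitize_cuts_alt cuts limit := by
  unfold sanitize_cuts sanitize_cuts_alt
  simp only []
  set F := cuts.filter (fun c => decide (0 ≤ c) && decide (c ≤ limit)) with hF
  set S0 := PySem.List.sorted (PySem.Set.ofList F) (fun x => x) false with hS0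
  have hFmem : ∀ x, x ∈ F ↔ x ∈ cuts ∧ 0 ≤ x ∧ x ≤ limit := by
    intro x
    rw [hF, List.mem_filter]
    simp
  -- B's value: a strictly increasing list with known membership
  set init := if 0 < limit then ([0, limit] : List Int) else [0] with hinit
  have hinitp : init.Pairwise (· < ·) := by
    rw [hinit]; split_ifs with h
    · simpa using h
    · simp
  have hinitmem : ∀ y, y ∈ init ↔ y = 0 ∨ (y = limit ∧ 0 < limit) := by
    intro y
    rw [hinit]; split_ifs with h
    · simp; tauto
    · simp; tauto
  set B := pvMerge init (pvMsort (cuts.filter (fun c => decide (0 < c) && decide (c < limit)))) with hB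
  have hBp : B.Pairwise (· < ·) := pvMerge_pairwise _ _ hinitp (pvMsort_pairwise _)
  have hBmem : ∀ y, y ∈ B ↔ y = 0 ∨ (y = limit ∧ 0 < limit) ∨ (y ∈ cuts ∧ 0 < y ∧ y < limit) := by
    intro y
    rw [hB, pvMerge_mem, hinitmem, pvMsort_mem]
    simp only [List.mem_filter, Bool.and_eq_true, decide_eq_true_eq]
    tauto
  by_cases hlim : limit < 0
  · -- limit < 0: the filter keeps nothing and the dedup loop drops the appended limit
    have hFnil : F = [] := by
      rw [hF, List.filter_eq_nil_iff]
      intro c _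
      simp only [Bool.and_eq_true, decide_eq_true_eq, not_and]
      omega
    have hS0nil : S0 = [] := by
      rw [hS0, hFnil]
      simp [PySem.Set.ofList_nil, PySem.List.sorted_eq_nil_iff]
    rw [hS0nil]
    have h1 : (if ([] : List Int) = [] ∨ ([] : List Int).head? ≠ some 0 then 0 :: ([] : List Int) else []) = [0] := by simp
    rw [h1]
    have h2 : ([0] : List Int).getLast? ≠ some limit := by
      simp only [List.getLast?_singleton, ne_eq, Option.some.injEq]
      omega
    rw [if_pos h2]
    rw [show ([0] : List Int) ++ [limit] = 0 :: [limit] from rfl, pvFoldl_top]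
    have hA : (0 : Int) :: pvDed 0 [limit] = [0] := by
      simp [pvDed, show ¬ (0 : Int) < limit by omega]
    rw [hA]
    -- B is also [0]: it is strictly increasing with sole member 0
    have hB0 : ∀ y, y ∈ B ↔ y ∈ ([0] : List Int) := by
      intro y
      rw [hBmem y]
      simp only [List.mem_singleton]
      constructor
      · rintro (rfl | ⟨rfl, h⟩ | ⟨_, h1, h2⟩) <;> omega
      · rintro rfl; exact Or.inl rfl
    have hBnd : B.Nodup := hBp.imp (fun h => ne_of_lt h)
    have hperm : ([0] : List Int).Perm B := by
      rw [List.perm_ext_iff_of_nodup (by simp) hBnd]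
      intro y
      exact (hB0 y).symm
    exact List.Perm.eq_of_pairwise (fun a b _ _ hab hba => by omega) (by simp) hBp hperm
  · -- 0 ≤ limit
    have hlim' : (0 : Int) ≤ limit := by omega
    have hS0lt : S0.Pairwise (· < ·) := by rw [hS0]; exact PySem.List.sorted_ofList_pairwise_lt F
    have hS0le : S0.Pairwise (· ≤ ·) := hS0lt.imp (fun h => le_of_lt h)
    have hS0mem : ∀ x, x ∈ S0 ↔ x ∈ F := by
      intro x; rw [hS0, PySem.List.mem_sorted, PySem.Set.mem_ofList]
    set seen1 := if S0 = [] ∨ S0.head? ≠ some 0 then 0 :: S0 else S0 with hseen1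
    have h1p : seen1.Pairwise (· ≤ ·) := by
      rw [hseen1]; split_ifs with hc
      · exact List.pairwise_cons.mpr ⟨fun y hy => ((hFmem y).mp ((hS0mem y).mp hy)).2.1, hS0le⟩
      · exact hS0le
    have h1mem : ∀ x, x ∈ seen1 ↔ x = 0 ∨ x ∈ F := by
      intro x
      rw [hseen1]; split_ifs with hc
      · simp [hS0mem x]
      · push Not at hc
        obtain ⟨hne, hhd⟩ := hc
        have h0 : (0 : Int) ∈ S0 := by
          obtain ⟨a, t, ht⟩ := List.exists_cons_of_ne_nil hne
          rw [ht] at hhd ⊢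
          simp only [List.head?_cons, Option.some.injEq] at hhd
          simp [hhd]
        rw [hS0mem x]
        constructor
        · exact Or.inr
        · rintro (rfl | hx)
          · exact (hS0mem 0).mp h0
          · exact hx
    have h1b : ∀ x ∈ seen1, x ≤ limit := by
      intro x hx
      rcases (h1mem x).mp hx with rfl | hx
      · exact hlim'
      · exact ((hFmem x).mp hx).2.2
    set seen2 := if seen1.getLast? ≠ some limit then seen1 ++ [limit] else seen1 with hseen2
    have h2p : seen2.Pairwise (· ≤ ·) := by
      rw [hseen2]; split_ifs with hc
      · exact List.pairwise_append.mpr ⟨h1p, by simp, by simpa using h1b⟩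
      · exact h1p
    have h2mem : ∀ x, x ∈ seen2 ↔ x = 0 ∨ x ∈ F ∨ x = limit := by
      intro x
      rw [hseen2]; split_ifs with hc
      · simp only [List.mem_append, List.mem_singleton, h1mem x]
        tauto
      · push Not at hc
        have hlmem : limit ∈ seen1 := List.mem_of_getLast? (l := seen1) (a := limit) hc
        rw [h1mem x]
        constructor
        · tauto
        · rintro (rfl | hx | hx)
          · exact Or.inl rfl
          · exact Or.inr hx
          · rw [hx]; exact (h1mem limit).mp hlmem
    have h2ne : seen2 ≠ [] := by
      intro hnil
      have := (h2mem 0).mpr (Or.inl rfl)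
      rw [hnil] at this
      simp at this
    rw [pvDedup_sorted seen2 h2p h2ne]
    -- B is a strictly increasing rearrangement of set(seen2)
    have hBnd : B.Nodup := hBp.imp (fun h => ne_of_lt h)
    have hsame : ∀ y, y ∈ B ↔ y ∈ seen2 := by
      intro y
      rw [hBmem y, h2mem y, hFmem y]
      constructor
      · rintro (rfl | ⟨rfl, h⟩ | ⟨h1, h2, h3⟩)
        · exact Or.inl rfl
        · exact Or.inr (Or.inr rfl)
        · exact Or.inr (Or.inl ⟨h1, by omega, by omega⟩)
      · rintro (rfl | ⟨h1, h2, h3⟩ | hyl)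
        · exact Or.inl rfl
        · by_cases hy0 : y = 0
          · exact Or.inl hy0
          · by_cases hyl : y = limit
            · exact Or.inr (Or.inl ⟨hyl, by omega⟩)
            · exact Or.inr (Or.inr ⟨h1, by omega, by omega⟩)
        · by_cases h : 0 < limit
          · exact Or.inr (Or.inl ⟨hyl, h⟩)
          · exact Or.inl (by omega)
    have hperm : B.Perm (PySem.Set.ofList seen2) := by
      rw [List.perm_ext_iff_of_nodup hBnd (PySem.Set.nodup_ofList _)]
      intro y
      rw [hsame y, PySem.Set.mem_ofList]
    exact PySem.List.sorted_eq_of_perm_of_pairwise_lt _ _ (fun x => x) hperm hBp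

-- ===== VERDICT (by name: the statement is the Claim_ definition above) =====
theorem sanitize_cuts_spec : Claim_equal_sanitize_cuts := by
  intro cuts limit _
  unfold Spec_sanitize_cuts
  exact sanitize_cuts_main cuts limit
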